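-- pv_equiv track=rewrite | github.com/Colossus-AI-Learning-Guide-System/backend-ml-component-python | byaldi/byaldi/app.py | parse_response
-- ===== SOURCE A (Python) =====
-- def parse_response(response_text):
--     """
--     Parse the response text into headings and descriptions.
--     """
--     structured_response = []
--     lines = response_text.split("\n")  # Split the response into lines
--
--     current_heading = None
--     current_description = []
--
--     for line in lines:
--         if line.strip().startswith(("1. ", "2. ", "3. ", "4. ", "5. ", "6. ", "7. ", "8. ", "9. ")):  # Detect numbered headings
--             if current_heading:  # Save the previous heading and description
--                 structured_response.append({
--                     "title": current_heading,
--                     "content": "\n".join(current_description).strip()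
--                 })
--             current_heading = line.strip()  # Start a new heading
--             current_description = []  # Reset the description
--         else:
--             current_description.append(line.strip())  # Add to the current description
--
--     # Add the last heading and description
--     if current_heading:
--         structured_response.append({
--             "title": current_heading,
--             "content": "\n".join(current_description).strip()
--         })
--
--     return structured_response
-- ===== SOURCE B (Python) =====
-- def parse_response(response_text):
--     """
--     Parse the response text into headings and descriptions.
--     """
--     prefixes = ("1. ", "2. ", "3. ", "4. ", "5. ", "6. ", "7. ", "8. ", "9. ")
--     rest = [line.strip() for line in response_text.split("\n")]
--     # drop everything before the first heading
--     while rest and not rest[0].startswith(prefixes):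
--         rest = rest[1:]
--     out = []
--     while rest:
--         head, rest = rest[0], rest[1:]
--         body = []
--         while rest and not rest[0].startswith(prefixes):
--             body.append(rest[0])
--             rest = rest[1:]
--         out.append({"title": head, "content": "\n".join(body).strip()})
--     return out
-- ===== Notes on version B (the rewrite author's own statement) =====
-- stated objective: alternative
-- what changed: Replaced A's single stateful pass carrying current_heading/current_description with an end-of-loop flush by a strip-all-lines-first, skip-the-preamble, then repeatedly-split-off-(heading, body-block)-chunks decomposition.
import Mathlib
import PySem

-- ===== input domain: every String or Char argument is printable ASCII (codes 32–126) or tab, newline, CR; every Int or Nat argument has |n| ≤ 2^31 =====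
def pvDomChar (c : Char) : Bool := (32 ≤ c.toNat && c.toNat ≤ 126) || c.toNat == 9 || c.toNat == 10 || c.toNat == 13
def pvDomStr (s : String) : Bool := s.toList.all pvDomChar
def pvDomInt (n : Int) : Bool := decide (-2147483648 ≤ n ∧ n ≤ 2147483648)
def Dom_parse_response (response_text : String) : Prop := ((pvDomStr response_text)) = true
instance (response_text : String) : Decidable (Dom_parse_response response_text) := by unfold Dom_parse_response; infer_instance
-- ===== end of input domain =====

-- B replaces A's stateful accumulator pass by a skip-preamble-then-split-off-chunks decomposition (alternative structure, not faster).
-- Both ports work on List Char (PySem.Chars is exact there); dict {"title": …, "content": …} is the association list per convention.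

-- ===== PORT A =====
-- line.strip().startswith(("1. ", …, "9. "))
def pvAHead (line : List Char) : Bool :=
  PySem.Chars.startswith (PySem.Chars.strip line) "1. ".toList ||
  PySem.Chars.startswith (PySem.Chars.strip line) "2. ".toList ||
  PySem.Chars.startswith (PySem.Chars.strip line) "3. ".toList ||
  PySem.Chars.startswith (PySem.Chars.strip line) "4. ".toList ||
  PySem.Chars.startswith (PySem.Chars.strip line) "5. ".toList ||
  PySem.Chars.startswith (PySem.Chars.strip line) "6. ".toList ||
  PySem.Chars.startswith (PySem.Chars.strip line) "7. ".toList ||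
  PySem.Chars.startswith (PySem.Chars.strip line) "8. ".toList ||
  PySem.Chars.startswith (PySem.Chars.strip line) "9. ".toList

-- loop body of A's for-loop; state = (structured_response, current_heading, current_description)
def pvAStep (st : List (List (String × String)) × Option (List Char) × List (List Char)) (line : List Char) :
    List (List (String × String)) × Option (List Char) × List (List Char) :=
  if pvAHead line then
    ((match st.2.1 with
      | some h =>
          if h = [] then st.1   -- Python truthiness: `if current_heading:` is false for None and for ""
          else st.1 ++ [[("title", String.ofList h), ("content", String.ofList (PySem.Chars.strip (PySem.Chars.join "\n".toList st.2.2)))]]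
      | none => st.1),
     some (PySem.Chars.strip line), [])
  else
    (st.1, st.2.1, st.2.2 ++ [PySem.Chars.strip line])

def parse_response (response_text : String) : List (List (String × String)) :=
  let st := (PySem.Chars.splitOn response_text.toList "\n".toList).foldl pvAStep ([], none, [])
  match st.2.1 with
  | some h =>
      if h = [] then st.1
      else st.1 ++ [[("title", String.ofList h), ("content", String.ofList (PySem.Chars.strip (PySem.Chars.join "\n".toList st.2.2)))]]
  | none => st.1

-- ===== PORT B =====
def pvBPrefixes : List (List Char) := ["1. ".toList, "2. ".toList, "3. ".toList, "4. ".toList, "5. ".toList, "6. ".toList, "7. ".toList, "8. ".toList, "9. ".toList]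

def pvBHead (l : List Char) : Bool := pvBPrefixes.any (fun p => PySem.Chars.startswith l p)

-- python B's inner while: returns (body, rest) after the loop
def pvBGrab : List (List Char) → List (List Char) × List (List Char)
  | [] => ([], [])
  | l :: rest =>
    if !pvBHead l then
      let br := pvBGrab rest
      (l :: br.1, br.2)
    else ([], l :: rest)

theorem pvBGrab_snd_le (ls : List (List Char)) : (pvBGrab ls).2.length ≤ ls.length := by
  induction ls with
  | nil => simp [pvBGrab]
  | cons l rest ih =>
    simp only [pvBGrab]
    split
    · simpa using Nat.le_succ_of_le ih
    · simp

-- python B's first while: drop everything before the first heading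
def pvBSkip : List (List Char) → List (List Char)
  | [] => []
  | l :: rest => if !pvBHead l then pvBSkip rest else l :: rest

-- python B's outer while
def pvBBuild : List (List Char) → List (List (String × String))
  | [] => []
  | l :: rest =>
    let br := pvBGrab rest
    [("title", String.ofList l), ("content", String.ofList (PySem.Chars.strip (PySem.Chars.join "\n".toList br.1)))] :: pvBBuild br.2
  termination_by ls => ls.length
  decreasing_by
    simpa using Nat.lt_succ_of_le (pvBGrab_snd_le rest)

def parse_response_alt (response_text : String) : List (List (String × String)) :=
  pvBBuild (pvBSkip ((PySem.Chars.splitOn response_text.toList "\n".toList).map PySem.Chars.strip))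

-- ===== PRECONDITION & SPEC =====
def Spec_parse_response (response_text : String) (out : List (List (String × String))) : Prop := out = parse_response_alt response_text
instance (response_text : String) (out : List (List (String × String))) : Decidable (Spec_parse_response response_text out) := by unfold Spec_parse_response; infer_instance

-- ===== CLAIM (what is proved, stated in full; the proofs are below) =====
def Claim_equal_parse_response : Prop := ∀ (response_text : String), Dom_parse_response response_text → Spec_parse_response response_text (parse_response response_text)

-- ===== LEMMAS AND PROOFS =====

-- A's entry builder, named for the proofs
def pvMkE (h : List Char) (d : List (List Char)) : List (String × String) :=
  [("title", String.ofList h), ("content", String.ofList (PySem.Chars.strip (PySem.Chars.join "\n".toList d)))]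

-- A's step on an already-stripped line
def pvStep' (st : List (List (String × String)) × Option (List Char) × List (List Char)) (l : List Char) :
    List (List (String × String)) × Option (List Char) × List (List Char) :=
  if pvBHead l then
    ((match st.2.1 with
      | some h => if h = [] then st.1 else st.1 ++ [pvMkE h st.2.2]
      | none => st.1),
     some l, [])
  else
    (st.1, st.2.1, st.2.2 ++ [l])

-- A's trailing flush, named
def pvFinish (st : List (List (String × String)) × Option (List Char) × List (List Char)) :
    List (List (String × String)) :=
  match st.2.1 with
  | some h => if h = [] then st.1 else st.1 ++ [pvMkE h st.2.2]
  | none => st.1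

theorem pvHead_eq (l : List Char) : pvAHead l = pvBHead (PySem.Chars.strip l) := by
  simp [pvAHead, pvBHead, pvBPrefixes, List.any, Bool.or_assoc]

theorem pvAStep_eq (st : List (List (String × String)) × Option (List Char) × List (List Char)) (l : List Char) :
    pvAStep st l = pvStep' st (PySem.Chars.strip l) := by
  simp [pvAStep, pvStep', pvMkE, pvHead_eq]

theorem pvBHead_ne_empty {s : List Char} (h : pvBHead s = true) : s ≠ [] := by
  intro he; subst he; exact absurd h (by decide)

theorem pvFold_some (ls : List (List Char)) :
    ∀ (acc : List (List (String × String))) (h : List Char) (desc : List (List Char)), h ≠ [] →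
    pvFinish (ls.foldl pvStep' (acc, some h, desc)) =
      acc ++ [pvMkE h (desc ++ (pvBGrab ls).1)] ++ pvBBuild (pvBGrab ls).2 := by
  induction ls with
  | nil => intro acc h desc hne; simp [pvFinish, pvBGrab, pvBBuild, hne]
  | cons l rest ih =>
    intro acc h desc hne
    by_cases hl : pvBHead l = true
    · have hlne : l ≠ [] := pvBHead_ne_empty hl
      simp only [List.foldl_cons, pvStep', hl, if_pos, hne, if_false, pvBGrab]
      rw [if_neg (by simp), ih (acc ++ [pvMkE h desc]) l [] hlne]
      simp [pvBBuild, pvMkE]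
    · have hl' : pvBHead l = false := by simpa using hl
      simp only [List.foldl_cons, pvStep', hl', Bool.false_eq_true, if_false, pvBGrab]
      rw [if_pos (by simp), ih acc h (desc ++ [l]) hne]
      simp

theorem pvFold_none (ls : List (List Char)) :
    ∀ (acc : List (List (String × String))) (desc : List (List Char)),
    pvFinish (ls.foldl pvStep' (acc, none, desc)) = acc ++ pvBBuild (pvBSkip ls) := by
  induction ls with
  | nil => intro acc desc; simp [pvFinish, pvBSkip, pvBBuild]
  | cons l rest ih =>
    intro acc desc
    by_cases hl : pvBHead l = true
    · have hlne : l ≠ [] := pvBHead_ne_empty hl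
      simp only [List.foldl_cons, pvStep', hl, if_pos, pvBSkip]
      rw [pvFold_some rest acc l [] hlne]
      simp [pvBBuild, pvMkE]
    · have hl' : pvBHead l = false := by simpa using hl
      simp only [List.foldl_cons, pvStep', hl', Bool.false_eq_true, if_false, pvBSkip]
      rw [ih acc (desc ++ [l])]
      simp

-- ===== VERDICT (by name: the statement is the Claim_ definition above) =====
theorem parse_response_spec : Claim_equal_parse_response := by
  intro rt _
  unfold Spec_parse_response parse_response parse_response_alt
  have hfold : (PySem.Chars.splitOn rt.toList "\n".toList).foldl pvAStep ([], none, []) =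
      ((PySem.Chars.splitOn rt.toList "\n".toList).map PySem.Chars.strip).foldl pvStep' ([], none, []) := by
    rw [List.foldl_map]
    have hstep : pvAStep = fun st l => pvStep' st (PySem.Chars.strip l) :=
      funext fun st => funext fun l => pvAStep_eq st l
    rw [hstep]
  show pvFinish ((PySem.Chars.splitOn rt.toList "\n".toList).foldl pvAStep ([], none, [])) = _
  rw [hfold, pvFold_none]
  simp
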